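-- pv_equiv track=rewrite | github.com/emelyrob/Systematic-Review-Rule-Base-Screening-Using-AI-to-Write-Python-Code | Resources/Examples/Title_Abstracts_Screening Script_HFpEF_Cardiac Terms_Example.py | check_metabolic_detail
-- ===== SOURCE A (Python) =====
-- def check_metabolic_detail(entry):
--     """Check if entry contains detailed metabolic pathway information"""
--     metabolic_terms = {
--         'glucose': [
--             'glut1', 'glut4', 'glucose transport', 'glucose uptake',
--             'glycolysis', 'pfk', 'phosphofructokinase',
--             'pyruvate dehydrogenase', 'pdh', 'pdk', 'mpc',
--             'glucose oxidation', 'pyruvate metabolism'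
--         ],
--         'fatty_acids': [
--             'cd36', 'fat transporter', 'fatty acid transport',
--             'cpt1', 'carnitine palmitoyltransferase',
--             'lcad', 'acad', 'ech', 'hadh', 'hydroxyacyl-coa',
--             'malonyl-coa', 'acc', 'acetyl-coa carboxylase', 'mcd',
--             'fatty acid oxidation', 'fat oxidation', 'fao'
--         ],
--         'ketones': [
--             'bohb', 'beta-hydroxybutyrate', 'ketone bodies',
--             'bdh1', 'hydroxybutyrate dehydrogenase',
--             'scot', 'ketoacid', 'ketone oxidation'
--         ],
--         'bcaa': [
--             'branched-chain amino acid', 'bcaa oxidation',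
--             'leucine', 'isoleucine', 'valine',
--             'bcatm', 'bckdh', 'lat', 'amino acid transport'
--         ],
--         'energy_metabolism': [
--             'tca cycle', 'krebs cycle', 'citric acid cycle',
--             'nadh', 'fadh2', 'electron transport chain', 'etc',
--             'oxidative phosphorylation', 'atp synthesis',
--             'atp production', 'mitochondrial respiration',
--             'acetyl-coa', 'proton gradient', 'metabolic stress',
--             'metabolic pathway'
--         ]
--     }
--
--     text = f"{entry.get('title', '')} {entry.get('abstract', '')}".lower()
--
--     pathway_matches = {pathway: 0 for pathway in metabolic_terms}
--     for pathway, terms in metabolic_terms.items():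
--         pathway_matches[pathway] = sum(1 for term in terms if term in text)
--
--     pathways_covered = sum(1 for count in pathway_matches.values() if count > 0)
--     detailed_pathway = any(count >= 1 for count in pathway_matches.values())
--
--     return pathways_covered >= 1 or detailed_pathway
-- ===== SOURCE B (Python) =====
-- ALL_TERMS = [
--     'glut1', 'glut4', 'glucose transport', 'glucose uptake',
--     'glycolysis', 'pfk', 'phosphofructokinase',
--     'pyruvate dehydrogenase', 'pdh', 'pdk', 'mpc',
--     'glucose oxidation', 'pyruvate metabolism',
--     'cd36', 'fat transporter', 'fatty acid transport',
--     'cpt1', 'carnitine palmitoyltransferase',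
--     'lcad', 'acad', 'ech', 'hadh', 'hydroxyacyl-coa',
--     'malonyl-coa', 'acc', 'acetyl-coa carboxylase', 'mcd',
--     'fatty acid oxidation', 'fat oxidation', 'fao',
--     'bohb', 'beta-hydroxybutyrate', 'ketone bodies',
--     'bdh1', 'hydroxybutyrate dehydrogenase',
--     'scot', 'ketoacid', 'ketone oxidation',
--     'branched-chain amino acid', 'bcaa oxidation',
--     'leucine', 'isoleucine', 'valine',
--     'bcatm', 'bckdh', 'lat', 'amino acid transport',
--     'tca cycle', 'krebs cycle', 'citric acid cycle',
--     'nadh', 'fadh2', 'electron transport chain', 'etc',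
--     'oxidative phosphorylation', 'atp synthesis',
--     'atp production', 'mitochondrial respiration',
--     'acetyl-coa', 'proton gradient', 'metabolic stress',
--     'metabolic pathway'
-- ]
--
-- def check_metabolic_detail(entry):
--     """Check if entry contains detailed metabolic pathway information"""
--     text = f"{entry.get('title', '')} {entry.get('abstract', '')}".lower()
--     return any(term in text for term in ALL_TERMS)
-- ===== Notes on version B (the rewrite author's own statement) =====
-- stated objective: simpler
-- what changed: Dropped A's per-pathway count dictionary and its two-phase aggregation (count each pathway's hits, then tally covered pathways and an any-count flag); B does a single short-circuiting any() over the flattened term list on the same lowered title+abstract text.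
import Mathlib
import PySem

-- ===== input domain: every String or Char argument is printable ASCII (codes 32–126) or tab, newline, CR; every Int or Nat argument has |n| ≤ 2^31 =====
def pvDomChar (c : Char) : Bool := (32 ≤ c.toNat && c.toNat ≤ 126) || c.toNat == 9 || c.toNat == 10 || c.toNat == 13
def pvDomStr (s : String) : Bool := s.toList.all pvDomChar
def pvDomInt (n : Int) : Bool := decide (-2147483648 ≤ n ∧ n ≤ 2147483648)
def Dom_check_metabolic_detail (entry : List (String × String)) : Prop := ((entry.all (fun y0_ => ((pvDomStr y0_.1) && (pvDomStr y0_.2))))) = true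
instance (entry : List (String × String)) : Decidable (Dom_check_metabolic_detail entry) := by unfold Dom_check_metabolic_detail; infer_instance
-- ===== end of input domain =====

-- B drops A's per-pathway count dictionary and its two-phase aggregation: one flat
-- short-circuiting pass over the flattened term list (objective: simpler).

-- ===== PORT A =====
-- the literal 'metabolic_terms' dict of A (insertion order kept)
def pvMetabolicTerms : List (String × List String) :=
  [("glucose",
     ["glut1", "glut4", "glucose transport", "glucose uptake",
      "glycolysis", "pfk", "phosphofructokinase",
      "pyruvate dehydrogenase", "pdh", "pdk", "mpc",
      "glucose oxidation", "pyruvate metabolism"]),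
   ("fatty_acids",
     ["cd36", "fat transporter", "fatty acid transport",
      "cpt1", "carnitine palmitoyltransferase",
      "lcad", "acad", "ech", "hadh", "hydroxyacyl-coa",
      "malonyl-coa", "acc", "acetyl-coa carboxylase", "mcd",
      "fatty acid oxidation", "fat oxidation", "fao"]),
   ("ketones",
     ["bohb", "beta-hydroxybutyrate", "ketone bodies",
      "bdh1", "hydroxybutyrate dehydrogenase",
      "scot", "ketoacid", "ketone oxidation"]),
   ("bcaa",
     ["branched-chain amino acid", "bcaa oxidation",
      "leucine", "isoleucine", "valine",
      "bcatm", "bckdh", "lat", "amino acid transport"]),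
   ("energy_metabolism",
     ["tca cycle", "krebs cycle", "citric acid cycle",
      "nadh", "fadh2", "electron transport chain", "etc",
      "oxidative phosphorylation", "atp synthesis",
      "atp production", "mitochondrial respiration",
      "acetyl-coa", "proton gradient", "metabolic stress",
      "metabolic pathway"])]

def check_metabolic_detail (entry : List (String × String)) : Bool :=
  let metabolic_terms : PySem.Dict String (List String) := PySem.Dict.mk pvMetabolicTerms
  let d : PySem.Dict String String := PySem.Dict.mk entry
  -- text = f"{entry.get('title', '')} {entry.get('abstract', '')}".lower()
  let text : String := PySem.Str.lower (d.getD "title" "" ++ " " ++ d.getD "abstract" "")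
  -- pathway_matches = {pathway: 0 for pathway in metabolic_terms}
  let pathway_matches : PySem.Dict String Int :=
    metabolic_terms.keys.foldl (fun pm pathway => pm.insert pathway 0) PySem.Dict.empty
  -- for pathway, terms in metabolic_terms.items(): pathway_matches[pathway] = sum(1 for term in terms if term in text)
  let pathway_matches : PySem.Dict String Int :=
    metabolic_terms.items.foldl (fun pm pt =>
        pm.insert pt.1 (pt.2.foldl (fun acc term => if PySem.Str.isIn term text then acc + 1 else acc) (0 : Int)))
      pathway_matches
  -- pathways_covered = sum(1 for count in pathway_matches.values() if count > 0)
  let pathways_covered : Int :=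
    pathway_matches.values.foldl (fun acc count => if 0 < count then acc + 1 else acc) 0
  -- detailed_pathway = any(count >= 1 for count in pathway_matches.values())
  let detailed_pathway : Bool := pathway_matches.values.any (fun count => decide (1 ≤ count))
  decide (1 ≤ pathways_covered) || detailed_pathway

-- ===== PORT B =====
-- same terms, flattened into one list
def pvAllTerms : List String :=
  ["glut1", "glut4", "glucose transport", "glucose uptake",
   "glycolysis", "pfk", "phosphofructokinase",
   "pyruvate dehydrogenase", "pdh", "pdk", "mpc",
   "glucose oxidation", "pyruvate metabolism",
   "cd36", "fat transporter", "fatty acid transport",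
   "cpt1", "carnitine palmitoyltransferase",
   "lcad", "acad", "ech", "hadh", "hydroxyacyl-coa",
   "malonyl-coa", "acc", "acetyl-coa carboxylase", "mcd",
   "fatty acid oxidation", "fat oxidation", "fao",
   "bohb", "beta-hydroxybutyrate", "ketone bodies",
   "bdh1", "hydroxybutyrate dehydrogenase",
   "scot", "ketoacid", "ketone oxidation",
   "branched-chain amino acid", "bcaa oxidation",
   "leucine", "isoleucine", "valine",
   "bcatm", "bckdh", "lat", "amino acid transport",
   "tca cycle", "krebs cycle", "citric acid cycle",
   "nadh", "fadh2", "electron transport chain", "etc",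
   "oxidative phosphorylation", "atp synthesis",
   "atp production", "mitochondrial respiration",
   "acetyl-coa", "proton gradient", "metabolic stress",
   "metabolic pathway"]

def check_metabolic_detail_alt (entry : List (String × String)) : Bool :=
  let d : PySem.Dict String String := PySem.Dict.mk entry
  let text : String := PySem.Str.lower (d.getD "title" "" ++ " " ++ d.getD "abstract" "")
  pvAllTerms.any (fun term => PySem.Str.isIn term text)

-- ===== PRECONDITION & SPEC =====
def Spec_check_metabolic_detail (entry : List (String × String)) (out : Bool) : Prop := out = check_metabolic_detail_alt entry
instance (entry : List (String × String)) (out : Bool) : Decidable (Spec_check_metabolic_detail entry out) := by unfold Spec_check_metabolic_detail; infer_instance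

-- ===== CLAIM (what is proved, stated in full; the proofs are below) =====
def Claim_equal_check_metabolic_detail : Prop := ∀ (entry : List (String × String)), Dom_check_metabolic_detail entry → Spec_check_metabolic_detail entry (check_metabolic_detail entry)

-- ===== LEMMAS AND PROOFS =====

-- A's value, with the lowered text generalized to an arbitrary string t,
-- equals B's flat short-circuit scan over the same terms.
theorem check_key (t : String) :
    (let metabolic_terms : PySem.Dict String (List String) := PySem.Dict.mk pvMetabolicTerms
     let pathway_matches : PySem.Dict String Int :=
       metabolic_terms.keys.foldl (fun pm pathway => pm.insert pathway 0) PySem.Dict.empty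
     let pathway_matches : PySem.Dict String Int :=
       metabolic_terms.items.foldl (fun pm pt =>
           pm.insert pt.1 (pt.2.foldl (fun acc term => if PySem.Str.isIn term t then acc + 1 else acc) (0 : Int)))
         pathway_matches
     let pathways_covered : Int :=
       pathway_matches.values.foldl (fun acc count => if 0 < count then acc + 1 else acc) 0
     let detailed_pathway : Bool := pathway_matches.values.any (fun count => decide (1 ≤ count))
     decide (1 ≤ pathways_covered) || detailed_pathway)
    = pvAllTerms.any (fun term => PySem.Str.isIn term t) := by
  rw [Bool.eq_iff_iff]
  simp only [PySem.List.foldl_if_add_one, PySem.List.foldl_ite_add_one]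
  simp [pvMetabolicTerms, pvAllTerms, PySem.Dict.keys, PySem.Dict.empty, PySem.Dict.insert,
    PySem.Dict.contains, PySem.Dict.values, List.foldl, List.any_eq_true]
  simp only [or_assoc]

-- ===== VERDICT (by name: the statement is the Claim_ definition above) =====
theorem check_metabolic_detail_spec : Claim_equal_check_metabolic_detail := by
  intro entry _
  unfold Spec_check_metabolic_detail check_metabolic_detail check_metabolic_detail_alt
  exact check_key _
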